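-- pv_equiv track=rewrite | github.com/Abhijnanmallick/coding | Year_calender/Get_jan.py | jan_fst
-- ===== SOURCE A (Python) =====
-- def jan_fst(year):
--     diff=year-1
--     leaps=0
--     x=1
--     while(x<year):
--         if((x%100)%4==0):
--             leaps+=1
--         x+=1
--     return ((leaps*366)+((diff-leaps)*365))%7
-- ===== SOURCE B (Python) =====
-- def jan_fst(year):
--     # Closed form: the loop's leap count equals the number of multiples of four
--     # below the year, and the year-lengths collapse modulo a week to days + leaps.
--     days = year - 1
--     leaps = max(days // 4, 0)
--     return (days + leaps) % 7
-- ===== Notes on version B (the rewrite author's own statement) =====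
-- stated objective: faster
-- what changed: Replaced the per-year counting loop by a closed-form leap count (integer division, clamped below at zero) and collapsed the year-length weights modulo a week into days plus leaps.
import Mathlib
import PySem

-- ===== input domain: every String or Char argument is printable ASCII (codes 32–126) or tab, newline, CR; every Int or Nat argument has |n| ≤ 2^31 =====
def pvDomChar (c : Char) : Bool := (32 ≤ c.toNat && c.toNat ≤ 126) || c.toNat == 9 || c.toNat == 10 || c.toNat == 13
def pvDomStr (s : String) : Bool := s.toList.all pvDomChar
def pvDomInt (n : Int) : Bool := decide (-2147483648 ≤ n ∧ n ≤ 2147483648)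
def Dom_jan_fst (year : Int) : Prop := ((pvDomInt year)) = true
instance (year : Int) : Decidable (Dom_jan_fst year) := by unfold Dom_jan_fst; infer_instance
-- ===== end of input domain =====

-- Faster exact re-implementation: B computes the loop's leap count by a closed-form
-- integer division instead of A's per-year counting loop.


-- ===== PORT A =====
-- the while loop of A: counts x in [x, year) with (x%100)%4 == 0
def janLoop (year x leaps : Int) : Int :=
  if x < year then
    janLoop year (x + 1)
      (if PySem.Int.mod (PySem.Int.mod x 100) 4 = 0 then leaps + 1 else leaps)
  else leaps
termination_by (year - x).toNat
decreasing_by omega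

def jan_fst (year : Int) : Int :=
  let diff := year - 1
  let leaps := janLoop year 1 0
  PySem.Int.mod (leaps * 366 + (diff - leaps) * 365) 7

-- ===== PORT B =====
def jan_fst_alt (year : Int) : Int :=
  let days := year - 1
  let leaps := max (PySem.Int.floordiv days 4) 0
  PySem.Int.mod (days + leaps) 7

-- ===== PRECONDITION & SPEC =====
def Spec_jan_fst (year : Int) (out : Int) : Prop := out = jan_fst_alt year
instance (year : Int) (out : Int) : Decidable (Spec_jan_fst year out) := by unfold Spec_jan_fst; infer_instance

-- ===== CLAIM (what is proved, stated in full; the proofs are below) =====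
def Claim_equal_jan_fst : Prop := ∀ (year : Int), Dom_jan_fst year → Spec_jan_fst year (jan_fst year)

-- ===== LEMMAS AND PROOFS =====

-- loop invariant: janLoop adds the number of multiples of 4 in [x, year)
theorem janLoop_eq (year : Int) : ∀ x leaps : Int,
    janLoop year x leaps = leaps + max ((year - 1) / 4 - (x - 1) / 4) 0 := by
  intro x leaps
  have hm100 : PySem.Int.mod x 100 = x % 100 := PySem.Int.mod_eq_emod_of_pos (by norm_num)
  rw [janLoop]
  split_ifs with h h2
  · -- x < year and (x % 100) % 4 == 0, i.e. 4 ∣ x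
    rw [janLoop_eq year (x + 1)]
    have hd : (4:Int) ∣ x % 100 := by
      rw [← hm100]; exact (PySem.Int.mod_eq_zero_iff_dvd _ _).mp h2
    have hdx : (4:Int) ∣ x := by omega
    have hs : x + 1 - 1 = x := by ring
    rw [hs]; omega
  · -- x < year and ¬ 4 ∣ x
    rw [janLoop_eq year (x + 1)]
    have hd : ¬ (4:Int) ∣ x % 100 := by
      rw [← hm100]; exact fun d => h2 ((PySem.Int.mod_eq_zero_iff_dvd _ _).mpr d)
    have hdx : ¬ (4:Int) ∣ x := by omega
    have hs : x + 1 - 1 = x := by ring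
    rw [hs]; omega
  · omega
termination_by x => (year - x).toNat
decreasing_by all_goals omega

-- ===== VERDICT (by name: the statement is the Claim_ definition above) =====
theorem jan_fst_spec : Claim_equal_jan_fst := by
  intro year _
  unfold Spec_jan_fst jan_fst jan_fst_alt
  rw [janLoop_eq]
  have hfd : PySem.Int.floordiv (year - 1) 4 = (year - 1) / 4 :=
    PySem.Int.floordiv_eq_ediv_of_pos (by norm_num)
  have hm7 : ∀ a : Int, PySem.Int.mod a 7 = a % 7 := fun a =>
    PySem.Int.mod_eq_emod_of_pos (by norm_num)
  simp only [hfd, hm7]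
  omega
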